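-- pv_equiv track=rewrite | github.com/AncientAbysswalker/psynt | cst_pane.py | list_max_index
-- ===== SOURCE A (Python) =====
-- def list_max_index(ls, n):
--     """Takes a list of numbers and returns the n max indices from max to min. Ties are returned as tuples at index"""
--     ls_return = []
--
--     reverse_ordered_list = list(reversed(sorted(set(ls))))
--
--     try:
--         for k in range(n):
--             ls_return.append([i for i, j in enumerate(ls) if j == reverse_ordered_list[k]])
--     except IndexError:
--         pass
--
--     return ls_return
-- ===== SOURCE B (Python) =====
-- def list_max_index(ls, n):
--     """Takes a list of numbers and returns the n max indices from max to min. Ties are returned as tuples at index"""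
--     groups = {}
--     for i, v in enumerate(ls):
--         groups.setdefault(v, []).append(i)
--     top = sorted(groups, reverse=True)[:max(0, n)]
--     return [groups[v] for v in top]
-- ===== Notes on version B (the rewrite author's own statement) =====
-- stated objective: faster
-- what changed: Replaced A's per-unique-value rescan of ls (a filtering comprehension over the whole list for each of the top n values) by a single grouping pass building a dict value->indices, then sorting the distinct values descending and taking the first max(0,n) groups.
-- intended difference: On ls = [] with n > 0 A's comprehension never evaluates reverse_ordered_list[k], so no IndexError fires and A returns n copies of []; B returns the intended [], since an empty list has no maxima. — e.g. on list_max_index([], 1): A returns [[]], B returns []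
import Mathlib
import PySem

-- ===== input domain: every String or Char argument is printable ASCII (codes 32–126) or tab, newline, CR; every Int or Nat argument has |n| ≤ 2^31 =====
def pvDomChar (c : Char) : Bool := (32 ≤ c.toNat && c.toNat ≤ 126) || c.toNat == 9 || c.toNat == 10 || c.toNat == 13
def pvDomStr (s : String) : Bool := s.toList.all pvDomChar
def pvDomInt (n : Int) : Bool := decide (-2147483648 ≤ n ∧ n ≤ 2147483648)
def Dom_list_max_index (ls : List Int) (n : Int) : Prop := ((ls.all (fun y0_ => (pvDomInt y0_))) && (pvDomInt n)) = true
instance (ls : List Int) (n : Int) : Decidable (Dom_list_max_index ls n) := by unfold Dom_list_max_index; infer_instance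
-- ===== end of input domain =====

-- B replaces A's per-value rescans of ls by a one-pass dict grouping value→indices,
-- then sorts the distinct values descending and takes the first max(0,n) groups (objective: faster).

-- ===== PORT A =====
-- the comprehension [i for i, j in enumerate(ls) if j == reverse_ordered_list[k]] for a given value v
def pvAGroup (ls : List Int) (v : Int) : List Int :=
  ((PySem.List.enumerate ls).filter (fun p => p.2 == v)).map (fun p => p.1)

-- the 'for k in range(n)' loop inside try/except IndexError; note that when ls = [] the
-- comprehension never evaluates rev[k], so CPython raises no IndexError and appends [] each round
def pvALoop (ls rev : List Int) (k : Int) : Nat → List (List Int)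
  | 0 => []
  | fuel + 1 =>
    if ls = [] then [] :: pvALoop ls rev (k + 1) fuel
    else
      match PySem.List.pyGet? rev k with
      | none => []                                  -- IndexError: caught, loop body stops, ls_return kept
      | some v => pvAGroup ls v :: pvALoop ls rev (k + 1) fuel

def list_max_index (ls : List Int) (n : Int) : List (List Int) :=
  pvALoop ls (PySem.List.sorted (PySem.Set.ofList ls) (fun x => x) false).reverse 0 n.toNat

-- ===== PORT B =====
def list_max_index_alt (ls : List Int) (n : Int) : List (List Int) :=
  let groups := (PySem.List.enumerate ls).foldl
      (fun d p => d.modify p.2 [] (fun l => l ++ [p.1])) PySem.Dict.empty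
  let top := PySem.List.slice (PySem.List.sorted groups.keys (fun x => x) true) none (some (max 0 n))
  top.map (fun v => groups.getD v [])

-- ===== PRECONDITION & SPEC =====
-- On ls = [] with n > 0, A's comprehension never indexes the empty unique-value list, so A
-- returns n copies of [] although there are no maxima; B returns the intended [].
def D_list_max_index (ls : List Int) (n : Int) : Prop := ls = [] ∧ 0 < n
instance (ls : List Int) (n : Int) : Decidable (D_list_max_index ls n) := by unfold D_list_max_index; infer_instance

def Spec_list_max_index (ls : List Int) (n : Int) (out : List (List Int)) : Prop :=
  ¬ D_list_max_index ls n → out = list_max_index_alt ls n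
instance (ls : List Int) (n : Int) (out : List (List Int)) : Decidable (Spec_list_max_index ls n out) := by unfold Spec_list_max_index; infer_instance

def pvDiffWitness_list_max_index : List Int × Int := ([], 1)
def pvDiffWitnessOut_list_max_index : (List (List Int)) × (List (List Int)) := ([[]], [])

-- ===== CLAIM (what is proved, stated in full; the proofs are below) =====
def Claim_unchanged_list_max_index : Prop := ∀ (ls : List Int) (n : Int), Dom_list_max_index ls n → Spec_list_max_index ls n (list_max_index ls n)
def Claim_changed_list_max_index : Prop := Dom_list_max_index (pvDiffWitness_list_max_index.1) (pvDiffWitness_list_max_index.2) ∧ D_list_max_index (pvDiffWitness_list_max_index.1) (pvDiffWitness_list_max_index.2) ∧ list_max_index (pvDiffWitness_list_max_index.1) (pvDiffWitness_list_max_index.2) = pvDiffWitnessOut_list_max_index.1 ∧ list_max_index_alt (pvDiffWitness_list_max_index.1) (pvDiffWitness_list_max_index.2) = pvDiffWitnessOut_list_max_index.2 ∧ pvDiffWitnessOut_list_max_index.1 ≠ pvDiffWitnessOut_list_max_index.2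
def Claim_exact_list_max_index : Prop := ∀ (ls : List Int) (n : Int), Dom_list_max_index ls n → D_list_max_index ls n → list_max_index ls n ≠ list_max_index_alt ls n

-- ===== LEMMAS AND PROOFS =====

-- B's grouping dict looks up to exactly A's comprehension
theorem pv_getD_groups (ls : List Int) (v : Int) :
    ((PySem.List.enumerate ls).foldl
      (fun d p => d.modify p.2 [] (fun l => l ++ [p.1])) PySem.Dict.empty).getD v []
    = pvAGroup ls v := by
  have h := PySem.Dict.getD_foldl_modify_append
    ((PySem.List.enumerate ls).map (fun p => (p.2, p.1))) PySem.Dict.empty v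
  rw [List.foldl_map] at h
  simpa [pvAGroup, PySem.Dict.getD_empty, List.filter_map, List.map_map, Function.comp] using h

-- B's dict keys are exactly set(ls) in first-occurrence order
theorem pv_keys_groups (ls : List Int) :
    ((PySem.List.enumerate ls).foldl
      (fun d p => d.modify p.2 [] (fun l => l ++ [p.1])) PySem.Dict.empty).keys
    = PySem.Set.ofList ls := by
  have h := PySem.Dict.keys_foldl_modify_key (PySem.List.enumerate ls) (fun p => p.2) []
    (fun _ p => (fun l => l ++ [p.1])) PySem.Dict.empty
  rw [h, PySem.Dict.keys_empty]
  have : (PySem.List.enumerate ls).map (fun p => p.2) = ls := by simp [pysem]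
  rw [this]
  exact PySem.Set.update_nil_left ls

-- reverse-sorting a duplicate-free list is reversing the sorted list
theorem pv_sorted_rev (xs : List Int) :
    PySem.List.sorted xs (fun x => x) true
      = (PySem.List.sorted xs (fun x => x) false).reverse := by
  have hneg : PySem.List.sorted xs (fun x => x) true = PySem.List.sorted xs (fun x => -x) false := by
    rw [PySem.List.sorted_rev_eq_foldl_insertBy, PySem.List.sorted_eq_foldl_insertBy]
    have : (fun (a b : Int) => decide (b < a)) = (fun a b => decide ((-a : Int) < -b)) := by
      funext a b; simp
    rw [this]
  apply PySem.List.eq_of_perm_of_pairwise_le_of_injective (fun x => -x) neg_injective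
  · exact ((PySem.List.sorted_perm xs _ true).trans
      ((PySem.List.sorted_perm xs _ false).symm)).trans (List.reverse_perm _).symm
  · rw [hneg]; exact PySem.List.sorted_pairwise xs (fun x => -x)
  · rw [List.pairwise_reverse]
    exact (PySem.List.sorted_pairwise xs (fun x => x)).imp (by intro a b h; simpa using h)

-- A's try-guarded loop takes successive groups until the value list runs out
theorem pv_aloop_take (ls rev : List Int) (hls : ls ≠ []) :
    ∀ (fuel k : Nat), pvALoop ls rev (k : Int) fuel = ((rev.drop k).take fuel).map (pvAGroup ls) := by
  intro fuel
  induction fuel with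
  | zero => intro k; simp [pvALoop]
  | succ fuel ih =>
    intro k
    rw [pvALoop, if_neg hls, PySem.List.pyGet?_natCast]
    by_cases hk : k < rev.length
    · rw [List.getElem?_eq_getElem hk]
      have hdrop : List.drop k rev = rev[k] :: List.drop (k + 1) rev := (List.getElem_cons_drop hk).symm
      rw [hdrop, List.take_succ_cons, List.map_cons]
      show pvAGroup ls rev[k] :: pvALoop ls rev ((k : Int) + 1) fuel = _
      have hcast : ((k : Int) + 1) = ((k + 1 : Nat) : Int) := by push_cast; ring
      rw [hcast, ih (k + 1)]
    · rw [List.getElem?_eq_none (by omega), List.drop_eq_nil_of_le (by omega)]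
      simp

-- on the empty list A appends one empty group per loop round
theorem pv_aloop_nil (rev : List Int) :
    ∀ (fuel : Nat) (k : Int), pvALoop [] rev k fuel = List.replicate fuel [] := by
  intro fuel
  induction fuel with
  | zero => intro k; simp [pvALoop]
  | succ fuel ih => intro k; rw [pvALoop, if_pos rfl, ih, List.replicate_succ]

-- B on the empty list returns []
theorem pv_alt_nil (n : Int) : list_max_index_alt [] n = [] := by
  simp only [list_max_index_alt]
  rw [show PySem.List.enumerate ([] : List Int) = [] from rfl, List.foldl_nil,
    PySem.Dict.keys_empty]
  rw [show PySem.List.sorted ([] : List Int) (fun x => x) true = [] from rfl,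
    PySem.List.slice_to _ (le_max_left 0 n)]
  simp

theorem pv_main (ls : List Int) (n : Int) (h : ¬ (ls = [] ∧ 0 < n)) :
    list_max_index ls n = list_max_index_alt ls n := by
  by_cases hls : ls = []
  · subst hls
    have hn : n ≤ 0 := by by_contra hc; exact h ⟨rfl, by omega⟩
    rw [pv_alt_nil, list_max_index, pv_aloop_nil]
    have : n.toNat = 0 := by omega
    rw [this, List.replicate_zero]
  · rw [list_max_index, show (0 : Int) = ((0 : Nat) : Int) from rfl,
      pv_aloop_take ls _ hls n.toNat 0, List.drop_zero]
    simp only [list_max_index_alt, pv_keys_groups,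
      pv_sorted_rev (PySem.Set.ofList ls),
      PySem.List.slice_to _ (le_max_left 0 n)]
    have hmax : (max 0 n).toNat = n.toNat := by omega
    rw [hmax]
    exact (List.map_congr_left (fun v _ => (pv_getD_groups ls v).symm))

-- ===== VERDICT (by name: the statement is the Claim_ definition above) =====
theorem list_max_index_spec : Claim_unchanged_list_max_index := by
  intro ls n _ hD
  exact pv_main ls n (by simpa [D_list_max_index] using hD)

theorem list_max_index_changed : Claim_changed_list_max_index := by
  unfold Claim_changed_list_max_index; decide

theorem list_max_index_tight : Claim_exact_list_max_index := by
  intro ls n _ hD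
  obtain ⟨hls, hn⟩ := hD
  subst hls
  rw [list_max_index, pv_aloop_nil, pv_alt_nil]
  have : n.toNat ≠ 0 := by omega
  simp [this]
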